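-- pv_equiv track=rewrite | github.com/JTMcCoy/aoc_2023 | src/utils.py | day_14_col_roller
-- ===== SOURCE A (Python) =====
-- def day_14_col_roller(col: list) -> list:
--     # utility to get the output of rolling round rocks, "O",
--     # upwards to the next square rock, "#"
--     col_roll = []
--
--     last_sq = 0
--     idx = 0
--     while idx < len(col):
--         # location of next
--         if "#" in col[last_sq:]:
--             idx = col[last_sq:].index("#") + last_sq
--             # number of 0s up to that square rock:
--             col_rocks = len([x for x in col[last_sq:idx] if x == "O"])
--             col_roll = (
--                 col_roll
--                 + ["O"] * col_rocks
--                 + ["."] * (idx - last_sq - col_rocks)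
--                 + ["#"]
--             )
--         else:
--             idx = len(col[last_sq:]) + last_sq
--             # number of 0s up to that square rock:
--             col_rocks = len([x for x in col[last_sq:idx] if x == "O"])
--             col_roll = (
--                 col_roll + ["O"] * col_rocks + ["."] * (idx - last_sq - col_rocks)
--             )
--
--         last_sq = idx + 1
--
--     return col_roll
-- ===== SOURCE B (Python) =====
-- def day_14_col_roller(col: list) -> list:
--     # single linear pass: count O's and others per segment, flush on each '#'
--     out = []
--     o = dots = 0
--     for x in col:
--         if x == "#":
--             out += ["O"] * o + ["."] * dots + ["#"]
--             o = dots = 0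
--         elif x == "O":
--             o += 1
--         else:
--             dots += 1
--     out += ["O"] * o + ["."] * dots
--     return out
-- ===== Notes on version B (the rewrite author's own statement) =====
-- stated objective: simpler
-- what changed: Replaced the repeated slicing/index/filter passes per '#'-segment with one linear left-to-right pass keeping two counters that are flushed at each '#'.
import Mathlib
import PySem

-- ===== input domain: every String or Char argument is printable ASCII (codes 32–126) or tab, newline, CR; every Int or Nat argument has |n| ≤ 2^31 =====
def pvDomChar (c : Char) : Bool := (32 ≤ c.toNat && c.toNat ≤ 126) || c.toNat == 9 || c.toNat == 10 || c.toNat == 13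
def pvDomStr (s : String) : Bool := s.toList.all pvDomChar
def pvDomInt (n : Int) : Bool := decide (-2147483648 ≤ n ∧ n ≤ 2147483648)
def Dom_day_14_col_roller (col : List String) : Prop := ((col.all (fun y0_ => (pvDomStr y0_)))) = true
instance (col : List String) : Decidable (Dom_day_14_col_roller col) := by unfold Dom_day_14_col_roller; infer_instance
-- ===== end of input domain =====

-- B replaces A's per-'#'-segment slicing, index() and filter passes by one plain left-to-right
-- pass keeping two counters that are flushed at each '#'.

-- ===== PORT A =====
-- A's loop state is (col_roll, last_sq); every read of col is through the slice col[last_sq:],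
-- so the port carries that suffix (rest = col[last_sq:]) and its acc, performing the same
-- index(), slice and count computations each round (i = idx - last_sq).
def pvLoopA (rest acc : List String) : List String :=
  if h : "#" ∈ rest then
    let i := rest.idxOf "#"                    -- col[last_sq:].index("#")
    let cnt := (rest.take i).count "O"         -- len([x for x in col[last_sq:idx] if x == "O"])
    pvLoopA (rest.drop (i + 1))
      (acc ++ List.replicate cnt "O" ++ List.replicate (i - cnt) "." ++ ["#"])
  else
    let cnt := rest.count "O"
    acc ++ List.replicate cnt "O" ++ List.replicate (rest.length - cnt) "."
termination_by rest.length
decreasing_by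
  have h0 : 0 < rest.length := List.length_pos_of_mem h
  simp [List.length_drop]; omega

def day_14_col_roller (col : List String) : List String := pvLoopA col []

-- ===== PORT B =====
def pvLoopB (rest : List String) (o d : Nat) (out : List String) : List String :=
  match rest with
  | [] => out ++ List.replicate o "O" ++ List.replicate d "."
  | x :: xs =>
    if x = "#" then
      pvLoopB xs 0 0 (out ++ List.replicate o "O" ++ List.replicate d "." ++ ["#"])
    else if x = "O" then
      pvLoopB xs (o + 1) d out
    else
      pvLoopB xs o (d + 1) out

def day_14_col_roller_alt (col : List String) : List String := pvLoopB col 0 0 []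

-- ===== PRECONDITION & SPEC =====
def Spec_day_14_col_roller (col : List String) (out : List String) : Prop := out = day_14_col_roller_alt col
instance (col : List String) (out : List String) : Decidable (Spec_day_14_col_roller col out) := by unfold Spec_day_14_col_roller; infer_instance

-- ===== CLAIM (what is proved, stated in full; the proofs are below) =====
def Claim_equal_day_14_col_roller : Prop := ∀ (col : List String), Dom_day_14_col_roller col → Spec_day_14_col_roller col (day_14_col_roller col)

-- ===== LEMMAS AND PROOFS =====

-- B on a '#'-free segment just accumulates the counters
theorem pvLoopB_no_hash (seg : List String) (h : "#" ∉ seg) :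
    ∀ (o d : Nat) (out : List String),
      pvLoopB seg o d out =
        out ++ List.replicate (o + seg.count "O") "O"
            ++ List.replicate (d + (seg.length - seg.count "O")) "." := by
  induction seg with
  | nil => intro o d out; simp [pvLoopB]
  | cons x xs ih =>
    intro o d out
    have hx : x ≠ "#" := fun hx => h (hx ▸ List.mem_cons_self)
    have hxs : "#" ∉ xs := fun hm => h (List.mem_cons_of_mem _ hm)
    have hc : xs.count "O" ≤ xs.length := List.count_le_length
    by_cases hO : x = "O"
    · subst hO
      simp only [pvLoopB, if_neg hx, ih hxs]
      simp
      omega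
    · simp only [pvLoopB, if_neg hx, if_neg hO, ih hxs]
      have : (x :: xs).count "O" = xs.count "O" := by
        simp [hO]
      rw [this]
      simp
      omega

-- B flushes the counters at a '#'
theorem pvLoopB_hash (seg : List String) (h : "#" ∉ seg) :
    ∀ (rest' : List String) (o d : Nat) (out : List String),
      pvLoopB (seg ++ "#" :: rest') o d out =
        pvLoopB rest' 0 0
          (out ++ List.replicate (o + seg.count "O") "O"
               ++ List.replicate (d + (seg.length - seg.count "O")) "." ++ ["#"]) := by
  induction seg with
  | nil => intro rest' o d out; simp [pvLoopB]
  | cons x xs ih =>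
    intro rest' o d out
    have hx : x ≠ "#" := fun hx => h (hx ▸ List.mem_cons_self)
    have hxs : "#" ∉ xs := fun hm => h (List.mem_cons_of_mem _ hm)
    have hc : xs.count "O" ≤ xs.length := List.count_le_length
    by_cases hO : x = "O"
    · subst hO
      simp only [List.cons_append, pvLoopB, if_neg hx, ih hxs]
      simp
      ring_nf
    · simp only [List.cons_append, pvLoopB, if_neg hx, if_neg hO, ih hxs]
      have : (x :: xs).count "O" = xs.count "O" := by
        simp [hO]
      rw [this]
      have : (x :: xs).length - xs.count "O" = (xs.length - xs.count "O") + 1 := by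
        simp; omega
      rw [this]
      ring_nf

-- decomposition at the first '#'
theorem pv_decomp (rest : List String) (h : "#" ∈ rest) :
    ∃ seg rest', rest = seg ++ "#" :: rest' ∧ "#" ∉ seg := by
  induction rest with
  | nil => cases h
  | cons x xs ih =>
    by_cases hx : x = "#"
    · exact ⟨[], xs, by simp [hx], by simp⟩
    · rcases ih (by rcases List.mem_cons.mp h with h1 | h2; exact absurd h1.symm hx; exact h2)
        with ⟨seg, rest', heq, hnm⟩
      exact ⟨x :: seg, rest', by simp [heq], by simp [hnm, Ne.symm, hx]⟩

theorem pv_main : ∀ (n : Nat) (rest : List String), rest.length ≤ n →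
    ∀ (acc : List String), pvLoopA rest acc = pvLoopB rest 0 0 acc := by
  intro n
  induction n with
  | zero =>
    intro rest hlen acc
    have : rest = [] := List.eq_nil_of_length_eq_zero (Nat.le_zero.mp hlen)
    subst this
    simp [pvLoopA, pvLoopB]
  | succ n ih =>
    intro rest hlen acc
    by_cases h : "#" ∈ rest
    · rcases pv_decomp rest h with ⟨seg, rest', heq, hnm⟩
      subst heq
      have hidx : (seg ++ "#" :: rest').idxOf "#" = seg.length := by
        rw [List.idxOf_append_of_notMem hnm]; simp
      rw [pvLoopA, dif_pos h]
      simp only [hidx]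
      have htake : (seg ++ "#" :: rest').take seg.length = seg := by
        rw [List.take_left']; rfl
      have hdrop : (seg ++ "#" :: rest').drop (seg.length + 1) = rest' := by
        have h2 : seg ++ "#" :: rest' = (seg ++ ["#"]) ++ rest' := by simp
        rw [h2, List.drop_left' (by simp)]
      rw [htake, hdrop]
      rw [pvLoopB_hash seg hnm]
      have hlen' : rest'.length ≤ n := by
        have := hlen; simp [List.length_append] at this; omega
      rw [ih rest' hlen']
      simp
    · rw [pvLoopA, dif_neg h, pvLoopB_no_hash rest h]
      simp

-- ===== VERDICT (by name: the statement is the Claim_ definition above) =====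
theorem day_14_col_roller_spec : Claim_equal_day_14_col_roller := by
  intro col _
  unfold Spec_day_14_col_roller day_14_col_roller day_14_col_roller_alt
  exact pv_main col.length col (le_refl _) []
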